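-- pv_equiv track=rewrite | github.com/onicolasmendes/TP_BCC361_Redes_Jogo_Poker_Online | src/Funcoes_auxiliares.py | verify_double_triple
-- ===== SOURCE A (Python) =====
-- def iniciate_list_zero(number):
--     sequence = []
--     for i in range(number):
--         sequence.append(0)
--     return sequence
--
-- def verify_double_triple(sequence):
--
--
--
--     frequency = iniciate_list_zero(13)
--
--     for i in sequence:
--         if (i == 2):
--             frequency[0] += 1
--         elif (i == 3):
--             frequency[1] += 1
--         elif (i == 4):
--             frequency[2] += 1
--         elif (i == 5):
--             frequency[3] += 1
--         elif (i == 6):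
--             frequency[4] += 1
--         elif (i == 7):
--             frequency[5] += 1
--         elif (i == 8):
--             frequency[6] += 1
--         elif (i == 9):
--             frequency[7] += 1
--         elif (i == 10):
--             frequency[8] += 1
--         elif (i == 11):
--             frequency[9] += 1
--         elif (i == 12):
--             frequency[10] += 1
--         elif (i == 13):
--             frequency[11] += 1
--         else:
--             frequency[12] += 1
--
--     return frequency
-- ===== SOURCE B (Python) =====
-- def verify_double_triple(sequence):
--     # one counting scan per bucket value, overflow bucket by arithmetic
--     frequency = [sequence.count(v) for v in range(2, 14)]
--     frequency.append(len(sequence) - sum(frequency))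
--     return frequency
-- ===== Notes on version B (the rewrite author's own statement) =====
-- stated objective: alternative
-- what changed: A makes one pass dispatching each element through a 13-way if/elif chain into a mutated list; B makes twelve separate counting passes (sequence.count(v) for v in 2..13) and derives the overflow bucket as len(sequence) minus their sum.
import Mathlib
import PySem

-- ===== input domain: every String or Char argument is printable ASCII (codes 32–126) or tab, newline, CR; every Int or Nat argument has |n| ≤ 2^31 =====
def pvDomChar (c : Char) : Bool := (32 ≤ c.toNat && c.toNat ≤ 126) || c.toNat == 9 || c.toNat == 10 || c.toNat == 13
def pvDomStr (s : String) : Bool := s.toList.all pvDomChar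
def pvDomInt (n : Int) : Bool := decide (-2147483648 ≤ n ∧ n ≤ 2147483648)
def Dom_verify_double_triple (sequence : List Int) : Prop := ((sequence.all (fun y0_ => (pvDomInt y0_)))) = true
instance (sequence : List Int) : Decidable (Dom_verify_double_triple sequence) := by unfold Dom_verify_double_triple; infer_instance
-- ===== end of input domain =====

-- B replaces A's single pass with a 13-way if/elif dispatch by twelve per-value counting scans (sequence.count(v), v = 2..13) plus arithmetic for the overflow bucket (alternative decomposition; same asymptotic cost).

-- ===== PORT A =====
def iniciate_list_zero (number : Int) : List Int :=
  (PySem.List.pyRange 0 number 1).foldl (fun sequence _ => sequence ++ [(0 : Int)]) []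

-- body of A's for-loop: the 13-branch if/elif chain; 'frequency[k] += 1' as read-then-write (indices are literal and in range)
def vdtStep (frequency : List Int) (i : Int) : List Int :=
  if i = 2 then PySem.List.pySetD frequency 0 (PySem.List.pyGetD frequency 0 0 + 1)
  else if i = 3 then PySem.List.pySetD frequency 1 (PySem.List.pyGetD frequency 1 0 + 1)
  else if i = 4 then PySem.List.pySetD frequency 2 (PySem.List.pyGetD frequency 2 0 + 1)
  else if i = 5 then PySem.List.pySetD frequency 3 (PySem.List.pyGetD frequency 3 0 + 1)
  else if i = 6 then PySem.List.pySetD frequency 4 (PySem.List.pyGetD frequency 4 0 + 1)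
  else if i = 7 then PySem.List.pySetD frequency 5 (PySem.List.pyGetD frequency 5 0 + 1)
  else if i = 8 then PySem.List.pySetD frequency 6 (PySem.List.pyGetD frequency 6 0 + 1)
  else if i = 9 then PySem.List.pySetD frequency 7 (PySem.List.pyGetD frequency 7 0 + 1)
  else if i = 10 then PySem.List.pySetD frequency 8 (PySem.List.pyGetD frequency 8 0 + 1)
  else if i = 11 then PySem.List.pySetD frequency 9 (PySem.List.pyGetD frequency 9 0 + 1)
  else if i = 12 then PySem.List.pySetD frequency 10 (PySem.List.pyGetD frequency 10 0 + 1)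
  else if i = 13 then PySem.List.pySetD frequency 11 (PySem.List.pyGetD frequency 11 0 + 1)
  else PySem.List.pySetD frequency 12 (PySem.List.pyGetD frequency 12 0 + 1)

def verify_double_triple (sequence : List Int) : List Int :=
  sequence.foldl vdtStep (iniciate_list_zero 13)

-- ===== PORT B =====
-- twelve counting scans, then the overflow bucket as length minus their sum
def verify_double_triple_alt (sequence : List Int) : List Int :=
  let frequency := (PySem.List.pyRange 2 14 1).map (fun v => (PySem.List.count sequence v : Int))
  frequency ++ [(sequence.length : Int) - frequency.sum]

-- ===== PRECONDITION & SPEC =====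
def Spec_verify_double_triple (sequence : List Int) (out : List Int) : Prop := out = verify_double_triple_alt sequence
instance (sequence : List Int) (out : List Int) : Decidable (Spec_verify_double_triple sequence out) := by unfold Spec_verify_double_triple; infer_instance

-- ===== CLAIM (what is proved, stated in full; the proofs are below) =====
def Claim_equal_verify_double_triple : Prop := ∀ (sequence : List Int), Dom_verify_double_triple sequence → Spec_verify_double_triple sequence (verify_double_triple sequence)

-- ===== LEMMAS AND PROOFS =====

theorem vdtStep_2 (a0 a1 a2 a3 a4 a5 a6 a7 a8 a9 a10 a11 a12 : Int) :
    vdtStep [a0,a1,a2,a3,a4,a5,a6,a7,a8,a9,a10,a11,a12] 2 = [a0+1,a1,a2,a3,a4,a5,a6,a7,a8,a9,a10,a11,a12] := by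
  norm_num [vdtStep, PySem.List.pySetD, PySem.List.pySet?, PySem.List.pyGetD, PySem.List.pyIdx?, List.set]

theorem vdtStep_3 (a0 a1 a2 a3 a4 a5 a6 a7 a8 a9 a10 a11 a12 : Int) :
    vdtStep [a0,a1,a2,a3,a4,a5,a6,a7,a8,a9,a10,a11,a12] 3 = [a0,a1+1,a2,a3,a4,a5,a6,a7,a8,a9,a10,a11,a12] := by
  norm_num [vdtStep, PySem.List.pySetD, PySem.List.pySet?, PySem.List.pyGetD, PySem.List.pyIdx?,
            show Int.toNat 1 = 1 from rfl, List.set]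

theorem vdtStep_4 (a0 a1 a2 a3 a4 a5 a6 a7 a8 a9 a10 a11 a12 : Int) :
    vdtStep [a0,a1,a2,a3,a4,a5,a6,a7,a8,a9,a10,a11,a12] 4 = [a0,a1,a2+1,a3,a4,a5,a6,a7,a8,a9,a10,a11,a12] := by
  norm_num [vdtStep, PySem.List.pySetD, PySem.List.pySet?, PySem.List.pyGetD, PySem.List.pyIdx?,
            show Int.toNat 2 = 2 from rfl, List.set]

theorem vdtStep_5 (a0 a1 a2 a3 a4 a5 a6 a7 a8 a9 a10 a11 a12 : Int) :
    vdtStep [a0,a1,a2,a3,a4,a5,a6,a7,a8,a9,a10,a11,a12] 5 = [a0,a1,a2,a3+1,a4,a5,a6,a7,a8,a9,a10,a11,a12] := by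
  norm_num [vdtStep, PySem.List.pySetD, PySem.List.pySet?, PySem.List.pyGetD, PySem.List.pyIdx?,
            show Int.toNat 3 = 3 from rfl, List.set]

theorem vdtStep_6 (a0 a1 a2 a3 a4 a5 a6 a7 a8 a9 a10 a11 a12 : Int) :
    vdtStep [a0,a1,a2,a3,a4,a5,a6,a7,a8,a9,a10,a11,a12] 6 = [a0,a1,a2,a3,a4+1,a5,a6,a7,a8,a9,a10,a11,a12] := by
  norm_num [vdtStep, PySem.List.pySetD, PySem.List.pySet?, PySem.List.pyGetD, PySem.List.pyIdx?,
            show Int.toNat 4 = 4 from rfl, List.set]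

theorem vdtStep_7 (a0 a1 a2 a3 a4 a5 a6 a7 a8 a9 a10 a11 a12 : Int) :
    vdtStep [a0,a1,a2,a3,a4,a5,a6,a7,a8,a9,a10,a11,a12] 7 = [a0,a1,a2,a3,a4,a5+1,a6,a7,a8,a9,a10,a11,a12] := by
  norm_num [vdtStep, PySem.List.pySetD, PySem.List.pySet?, PySem.List.pyGetD, PySem.List.pyIdx?,
            show Int.toNat 5 = 5 from rfl, List.set]

theorem vdtStep_8 (a0 a1 a2 a3 a4 a5 a6 a7 a8 a9 a10 a11 a12 : Int) :
    vdtStep [a0,a1,a2,a3,a4,a5,a6,a7,a8,a9,a10,a11,a12] 8 = [a0,a1,a2,a3,a4,a5,a6+1,a7,a8,a9,a10,a11,a12] := by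
  norm_num [vdtStep, PySem.List.pySetD, PySem.List.pySet?, PySem.List.pyGetD, PySem.List.pyIdx?,
            show Int.toNat 6 = 6 from rfl, List.set]

theorem vdtStep_9 (a0 a1 a2 a3 a4 a5 a6 a7 a8 a9 a10 a11 a12 : Int) :
    vdtStep [a0,a1,a2,a3,a4,a5,a6,a7,a8,a9,a10,a11,a12] 9 = [a0,a1,a2,a3,a4,a5,a6,a7+1,a8,a9,a10,a11,a12] := by
  norm_num [vdtStep, PySem.List.pySetD, PySem.List.pySet?, PySem.List.pyGetD, PySem.List.pyIdx?,
            show Int.toNat 7 = 7 from rfl, List.set]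

theorem vdtStep_10 (a0 a1 a2 a3 a4 a5 a6 a7 a8 a9 a10 a11 a12 : Int) :
    vdtStep [a0,a1,a2,a3,a4,a5,a6,a7,a8,a9,a10,a11,a12] 10 = [a0,a1,a2,a3,a4,a5,a6,a7,a8+1,a9,a10,a11,a12] := by
  norm_num [vdtStep, PySem.List.pySetD, PySem.List.pySet?, PySem.List.pyGetD, PySem.List.pyIdx?,
            show Int.toNat 8 = 8 from rfl, List.set]

theorem vdtStep_11 (a0 a1 a2 a3 a4 a5 a6 a7 a8 a9 a10 a11 a12 : Int) :
    vdtStep [a0,a1,a2,a3,a4,a5,a6,a7,a8,a9,a10,a11,a12] 11 = [a0,a1,a2,a3,a4,a5,a6,a7,a8,a9+1,a10,a11,a12] := by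
  norm_num [vdtStep, PySem.List.pySetD, PySem.List.pySet?, PySem.List.pyGetD, PySem.List.pyIdx?,
            show Int.toNat 9 = 9 from rfl, List.set]

theorem vdtStep_12 (a0 a1 a2 a3 a4 a5 a6 a7 a8 a9 a10 a11 a12 : Int) :
    vdtStep [a0,a1,a2,a3,a4,a5,a6,a7,a8,a9,a10,a11,a12] 12 = [a0,a1,a2,a3,a4,a5,a6,a7,a8,a9,a10+1,a11,a12] := by
  norm_num [vdtStep, PySem.List.pySetD, PySem.List.pySet?, PySem.List.pyGetD, PySem.List.pyIdx?,
            show Int.toNat 10 = 10 from rfl, List.set]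

theorem vdtStep_13 (a0 a1 a2 a3 a4 a5 a6 a7 a8 a9 a10 a11 a12 : Int) :
    vdtStep [a0,a1,a2,a3,a4,a5,a6,a7,a8,a9,a10,a11,a12] 13 = [a0,a1,a2,a3,a4,a5,a6,a7,a8,a9,a10,a11+1,a12] := by
  norm_num [vdtStep, PySem.List.pySetD, PySem.List.pySet?, PySem.List.pyGetD, PySem.List.pyIdx?,
            show Int.toNat 11 = 11 from rfl, List.set]

theorem vdtStep_other (i : Int) (h2 : i ≠ 2) (h3 : i ≠ 3) (h4 : i ≠ 4) (h5 : i ≠ 5) (h6 : i ≠ 6)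
    (h7 : i ≠ 7) (h8 : i ≠ 8) (h9 : i ≠ 9) (h10 : i ≠ 10) (h11 : i ≠ 11) (h12 : i ≠ 12) (h13 : i ≠ 13)
    (a0 a1 a2 a3 a4 a5 a6 a7 a8 a9 a10 a11 a12 : Int) :
    vdtStep [a0,a1,a2,a3,a4,a5,a6,a7,a8,a9,a10,a11,a12] i = [a0,a1,a2,a3,a4,a5,a6,a7,a8,a9,a10,a11,a12+1] := by
  norm_num [vdtStep, h2, h3, h4, h5, h6, h7, h8, h9, h10, h11, h12, h13,
            PySem.List.pySetD, PySem.List.pySet?, PySem.List.pyGetD, PySem.List.pyIdx?,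
            show Int.toNat 12 = 12 from rfl, List.set]

-- characterisation of A's fold: each bucket accumulates the count of its value
theorem vdt_fold_char (seq : List Int) (a0 a1 a2 a3 a4 a5 a6 a7 a8 a9 a10 a11 a12 : Int) :
    seq.foldl vdtStep [a0,a1,a2,a3,a4,a5,a6,a7,a8,a9,a10,a11,a12] =
    [a0 + (seq.count 2 : Int), a1 + (seq.count 3 : Int), a2 + (seq.count 4 : Int),
     a3 + (seq.count 5 : Int), a4 + (seq.count 6 : Int), a5 + (seq.count 7 : Int),
     a6 + (seq.count 8 : Int), a7 + (seq.count 9 : Int), a8 + (seq.count 10 : Int),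
     a9 + (seq.count 11 : Int), a10 + (seq.count 12 : Int), a11 + (seq.count 13 : Int),
     a12 + (seq.countP (fun x => decide (x < 2 ∨ 13 < x)) : Int)] := by
  induction seq generalizing a0 a1 a2 a3 a4 a5 a6 a7 a8 a9 a10 a11 a12 with
  | nil => simp
  | cons i rest ih =>
    rw [List.foldl_cons]
    rcases (show i = 2 ∨ i = 3 ∨ i = 4 ∨ i = 5 ∨ i = 6 ∨ i = 7 ∨ i = 8 ∨ i = 9 ∨ i = 10 ∨
        i = 11 ∨ i = 12 ∨ i = 13 ∨ (i < 2 ∨ 13 < i) from by omega) with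
      h|h|h|h|h|h|h|h|h|h|h|h|h <;>
      [ (subst h; rw [vdtStep_2]); (subst h; rw [vdtStep_3]); (subst h; rw [vdtStep_4]);
        (subst h; rw [vdtStep_5]); (subst h; rw [vdtStep_6]); (subst h; rw [vdtStep_7]);
        (subst h; rw [vdtStep_8]); (subst h; rw [vdtStep_9]); (subst h; rw [vdtStep_10]);
        (subst h; rw [vdtStep_11]); (subst h; rw [vdtStep_12]); (subst h; rw [vdtStep_13]);
        rw [vdtStep_other i (by omega) (by omega) (by omega) (by omega) (by omega) (by omega)
              (by omega) (by omega) (by omega) (by omega) (by omega) (by omega)] ] <;>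
      rw [ih] <;>
      norm_num [List.count_cons, List.countP_cons] <;>
      and_intros <;> omega

-- every element falls in exactly one bucket, so the bucket counts sum to the length
theorem counts_sum (seq : List Int) :
    seq.count 2 + seq.count 3 + seq.count 4 + seq.count 5 + seq.count 6 + seq.count 7 +
    seq.count 8 + seq.count 9 + seq.count 10 + seq.count 11 + seq.count 12 + seq.count 13 +
    seq.countP (fun x => decide (x < 2 ∨ 13 < x)) = seq.length := by
  induction seq with
  | nil => simp
  | cons i rest ih =>
    rcases (show i = 2 ∨ i = 3 ∨ i = 4 ∨ i = 5 ∨ i = 6 ∨ i = 7 ∨ i = 8 ∨ i = 9 ∨ i = 10 ∨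
        i = 11 ∨ i = 12 ∨ i = 13 ∨ (i < 2 ∨ 13 < i) from by omega) with
      h|h|h|h|h|h|h|h|h|h|h|h|h
    · (subst h; norm_num [List.count_cons, List.countP_cons] at ih ⊢ <;> omega)
    · (subst h; norm_num [List.count_cons, List.countP_cons] at ih ⊢ <;> omega)
    · (subst h; norm_num [List.count_cons, List.countP_cons] at ih ⊢ <;> omega)
    · (subst h; norm_num [List.count_cons, List.countP_cons] at ih ⊢ <;> omega)
    · (subst h; norm_num [List.count_cons, List.countP_cons] at ih ⊢ <;> omega)
    · (subst h; norm_num [List.count_cons, List.countP_cons] at ih ⊢ <;> omega)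
    · (subst h; norm_num [List.count_cons, List.countP_cons] at ih ⊢ <;> omega)
    · (subst h; norm_num [List.count_cons, List.countP_cons] at ih ⊢ <;> omega)
    · (subst h; norm_num [List.count_cons, List.countP_cons] at ih ⊢ <;> omega)
    · (subst h; norm_num [List.count_cons, List.countP_cons] at ih ⊢ <;> omega)
    · (subst h; norm_num [List.count_cons, List.countP_cons] at ih ⊢ <;> omega)
    · (subst h; norm_num [List.count_cons, List.countP_cons] at ih ⊢ <;> omega)
    · simp only [List.count_cons, List.countP_cons, List.length_cons, beq_iff_eq,
        decide_eq_true_eq,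
        if_neg (show ¬(i = (2:Int)) from by omega), if_neg (show ¬(i = (3:Int)) from by omega),
        if_neg (show ¬(i = (4:Int)) from by omega), if_neg (show ¬(i = (5:Int)) from by omega),
        if_neg (show ¬(i = (6:Int)) from by omega), if_neg (show ¬(i = (7:Int)) from by omega),
        if_neg (show ¬(i = (8:Int)) from by omega), if_neg (show ¬(i = (9:Int)) from by omega),
        if_neg (show ¬(i = (10:Int)) from by omega), if_neg (show ¬(i = (11:Int)) from by omega),
        if_neg (show ¬(i = (12:Int)) from by omega), if_neg (show ¬(i = (13:Int)) from by omega),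
        if_pos h]
      omega

-- ===== VERDICT (by name: the statement is the Claim_ definition above) =====
theorem verify_double_triple_spec : Claim_equal_verify_double_triple := by
  intro seq _
  unfold Spec_verify_double_triple verify_double_triple verify_double_triple_alt
  rw [show iniciate_list_zero 13 = [0,0,0,0,0,0,0,0,0,0,0,0,0] from by decide]
  rw [show PySem.List.pyRange 2 14 1 = ([2,3,4,5,6,7,8,9,10,11,12,13] : List Int) from by decide]
  rw [vdt_fold_char]
  have h := counts_sum seq
  simp only [List.map_cons, List.map_nil, PySem.List.count_eq, List.cons_append,
             List.nil_append, List.sum_cons, List.sum_nil, List.cons.injEq]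
  and_intros <;> push_cast <;> omega
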